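-- pv_equiv track=rewrite | github.com/SpandanaK0/FirstYearProjects | FriendsCount/friendCount.py | find_max_common_friends
-- ===== SOURCE A (Python) =====
-- def find_common_friends(name1, name2, friends_dict):
--
--     name1_sec = friends_dict[name1]
--     name2_sec = friends_dict[name2]
--     name1_set = set(name1_sec)
--     name2_set = set(name2_sec)
--     var = (name1_set).intersection(name2_set)
--     return var
--
-- def find_max_common_friends(friends_dict):
--
--     f_dict= {}
--     end_value =[]
--     for i in friends_dict:
--         for n in friends_dict:
--             if i == n:
--                 continue
--             if (n,i) in f_dict:
--                 continue
--             if n in friends_dict[i] or i in friends_dict[n]: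
--                 continue
--             find_com = find_common_friends(i,n,friends_dict)
--             tup = (i,n)
--             common_friends = len(find_com)
--             f_dict[tup]= common_friends
--     max_var = max(f_dict.values())
--     for v in f_dict:
--         if f_dict[v]== max_var:
--             end_value.append(v)
--     end_value.sort()
--     return end_value, max_var
-- ===== SOURCE B (Python) =====
-- def find_max_common_friends(friends_dict):
--     keys = list(friends_dict)
--     # eligible ordered pairs (i before n in key order, not friends either way)
--     pairs = []
--     for a, i in enumerate(keys):
--         for n in keys[a + 1:]:
--             if n in friends_dict[i] or i in friends_dict[n]:
--                 continue
--             pairs.append((i, n))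
--     # tally common-friend counts: for every person c, every ordered pair of
--     # distinct key-holders who both list c gains one common friend
--     members = {}
--     for k in keys:
--         for c in dict.fromkeys(friends_dict[k]):
--             members.setdefault(c, []).append(k)
--     counts = {}
--     for ks in members.values():
--         for x, i in enumerate(ks):
--             for n in ks[x + 1:]:
--                 p = (i, n)
--                 counts[p] = counts.get(p, 0) + 1
--     max_var = max(counts.get(p, 0) for p in pairs)
--     end_value = sorted(p for p in pairs if counts.get(p, 0) == max_var)
--     return end_value, max_var
-- ===== Notes on version B (the rewrite author's own statement) =====
-- stated objective: faster
-- what changed: Instead of A's per-pair set intersection over all non-friend key pairs (O(k^2*d) with a redundant reversed-pair dict check), B tallies common-friend counts once by enumerating, for every listed person, the ordered pairs of key-holders who both list them, then reads each eligible pair's count out of that tally.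
import Mathlib
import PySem

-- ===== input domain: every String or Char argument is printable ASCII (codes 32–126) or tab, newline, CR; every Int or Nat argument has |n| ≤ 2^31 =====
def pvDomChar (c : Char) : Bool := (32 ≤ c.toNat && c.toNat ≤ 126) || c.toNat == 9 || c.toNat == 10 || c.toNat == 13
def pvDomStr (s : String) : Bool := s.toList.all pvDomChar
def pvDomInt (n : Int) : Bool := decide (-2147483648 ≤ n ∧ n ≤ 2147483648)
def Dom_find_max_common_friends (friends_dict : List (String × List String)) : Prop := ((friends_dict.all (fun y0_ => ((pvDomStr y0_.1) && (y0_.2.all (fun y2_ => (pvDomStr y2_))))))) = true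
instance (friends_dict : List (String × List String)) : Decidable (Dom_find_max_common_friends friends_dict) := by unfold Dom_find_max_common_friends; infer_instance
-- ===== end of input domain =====

-- B replaces A's quadratic scan (an intersection per pair of keys) by a single tally of
-- common-friend counts from per-person friend-pair enumeration; equal where A returns.

-- ===== PORT A =====
-- dict lookup friends_dict[k]; exact at every call site (k is always a key, so no KeyError)
def pvGet (friends_dict : List (String × List String)) (k : String) : List String :=
  ((friends_dict.find? (fun p => p.1 == k)).map (·.2)).getD []

def find_common_friends (name1 : String) (name2 : String)
    (friends_dict : List (String × List String)) : PySem.Set String :=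
  let name1_sec := pvGet friends_dict name1
  let name2_sec := pvGet friends_dict name2
  let name1_set := PySem.Set.ofList name1_sec
  let name2_set := PySem.Set.ofList name2_sec
  PySem.Set.inter name1_set name2_set

def find_max_common_friends (friends_dict : List (String × List String)) :
    (List (String × String)) × Int :=
  let keys := friends_dict.map (·.1)
  let f_dict : PySem.Dict (String × String) Int :=
    keys.foldl (fun d i =>
      keys.foldl (fun d n =>
        if i == n then d
        else if d.contains (n, i) then d
        else if (pvGet friends_dict i).contains n || (pvGet friends_dict n).contains i then d
        else d.insert (i, n) (PySem.Set.len (find_common_friends i n friends_dict))) d)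
      PySem.Dict.empty
  match PySem.List.max? f_dict.values (fun v => v) with
  | none => ([], 0)          -- max() of an empty sequence raises ValueError: excluded by Pre_
  | some max_var =>
    let end_value :=
      f_dict.keys.foldl (fun acc v => if f_dict.getD v 0 == max_var then acc ++ [v] else acc) []
    (PySem.List.sorted2 end_value (·.1) (·.2), max_var)

-- ===== PORT B =====
def find_max_common_friends_alt (friends_dict : List (String × List String)) :
    (List (String × String)) × Int :=
  let keys := friends_dict.map (·.1)
  let pairs : List (String × String) :=
    (PySem.List.enumerate keys).foldl (fun acc ai =>
      (PySem.List.slice keys (some (ai.1 + 1)) none).foldl (fun acc n =>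
        if (pvGet friends_dict ai.2).contains n || (pvGet friends_dict n).contains ai.2 then acc
        else acc ++ [(ai.2, n)]) acc) []
  let members : PySem.Dict String (List String) :=
    keys.foldl (fun m k =>
      (PySem.List.dedup (pvGet friends_dict k)).foldl
        (fun m c => m.modify c [] (fun l => l ++ [k])) m) PySem.Dict.empty
  let counts : PySem.Dict (String × String) Int :=
    members.values.foldl (fun cd ks =>
      (PySem.List.enumerate ks).foldl (fun cd xi =>
        (PySem.List.slice ks (some (xi.1 + 1)) none).foldl (fun cd n =>
          cd.insert (xi.2, n) (cd.getD (xi.2, n) 0 + 1)) cd) cd) PySem.Dict.empty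
  match PySem.List.max? (pairs.map (fun p => counts.getD p 0)) (fun v => v) with
  | none => ([], 0)          -- max() of an empty sequence raises ValueError, as in A
  | some max_var =>
    (PySem.List.sorted2 (pairs.filter (fun p => counts.getD p 0 == max_var)) (·.1) (·.2), max_var)

-- ===== PRECONDITION & SPEC =====
-- Pre_ excludes (a) association lists with duplicate keys, which do not arise from a Python
-- dict argument at all, and (b) inputs with no pair of distinct keys that are non-friends
-- both ways, on which A's max() of an empty sequence raises ValueError (B's max() raises
-- ValueError there too).
def Pre_find_max_common_friends (friends_dict : List (String × List String)) : Prop :=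
  (friends_dict.map (·.1)).Nodup ∧
  ∃ x ∈ friends_dict, ∃ y ∈ friends_dict, x.1 ≠ y.1 ∧ ¬(y.1 ∈ x.2 ∨ x.1 ∈ y.2)

instance (friends_dict : List (String × List String)) :
    Decidable (Pre_find_max_common_friends friends_dict) := by
  unfold Pre_find_max_common_friends; infer_instance

def pvWitness_find_max_common_friends : (List (String × List String)) :=
  [("a", ["c"]), ("b", ["c"])]

def Spec_find_max_common_friends (friends_dict : List (String × List String))
    (out : (List (String × String)) × Int) : Prop :=
  out = find_max_common_friends_alt friends_dict

instance (friends_dict : List (String × List String)) (out : (List (String × String)) × Int) :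
    Decidable (Spec_find_max_common_friends friends_dict out) := by
  unfold Spec_find_max_common_friends; infer_instance

-- ===== CLAIM (what is proved, stated in full; the proofs are below) =====
def Claim_equal_find_max_common_friends : Prop :=
  ∀ (friends_dict : List (String × List String)), Dom_find_max_common_friends friends_dict →
    Pre_find_max_common_friends friends_dict →
    Spec_find_max_common_friends friends_dict (find_max_common_friends friends_dict)

-- ===== LEMMAS AND PROOFS =====

-- eligibility of an ordered pair of keys: not friends in either direction
def pvElig (fd : List (String × List String)) (p : String × String) : Bool :=
  !((pvGet fd p.1).contains p.2 || (pvGet fd p.2).contains p.1)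

-- the common-friend count A stores for a pair
def pvCnt (fd : List (String × List String)) (p : String × String) : Int :=
  PySem.Set.len (find_common_friends p.1 p.2 fd)

-- ordered pairs (earlier element first) of a list
def opairs {α : Type} : List α → List (α × α)
  | [] => []
  | x :: t => (t.map (fun y => (x, y))) ++ opairs t

-- the eligible ordered key pairs, in A's insertion order
def pvE (fd : List (String × List String)) : List (String × String) :=
  (opairs (fd.map (·.1))).filter (pvElig fd)

-- A's inner-loop step
def AStep (fd : List (String × List String)) (i : String) :
    PySem.Dict (String × String) Int → String → PySem.Dict (String × String) Int :=
  fun d n =>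
    if i == n then d
    else if d.contains (n, i) then d
    else if (pvGet fd i).contains n || (pvGet fd n).contains i then d
    else d.insert (i, n) (PySem.Set.len (find_common_friends i n fd))

-- structural form of "for idx, x in enumerate(xs): ... xs[idx+1:] ..."
def sufFold {α β : Type} (f : β → α → List α → β) : List α → β → β
  | [], b => b
  | x :: t, b => sufFold f t (f b x t)

theorem pvElig_symm (fd : List (String × List String)) (i n : String) :
    pvElig fd (i, n) = pvElig fd (n, i) := by
  simp [pvElig, Bool.or_comm]

theorem foldl_id {α β : Type} (f : β → α → β) (l : List α) (b : β)
    (h : ∀ x ∈ l, f b x = b) : l.foldl f b = b := by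
  induction l with
  | nil => rfl
  | cons x t ih =>
    rw [List.foldl_cons, h x (by simp)]
    exact ih (fun y hy => h y (by simp [hy]))

theorem enumFold {α β : Type} (f : β → α → List α → β) :
    ∀ (xs pref : List α) (b : β),
    (PySem.List.enumerate xs (pref.length : Int)).foldl
      (fun b ai => f b ai.2 (PySem.List.slice (pref ++ xs) (some (ai.1 + 1)) none)) b
    = sufFold f xs b := by
  intro xs
  induction xs with
  | nil => intro pref b; simp [PySem.List.enumerate, sufFold]
  | cons x t ih =>
    intro pref b
    rw [PySem.List.enumerate_cons, List.foldl_cons, sufFold]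
    have hsl : PySem.List.slice (pref ++ x :: t) (some ((pref.length : Int) + 1)) none = t := by
      rw [PySem.List.slice_from _ (by positivity)]
      have : ((pref.length : Int) + 1).toNat = (pref ++ [x]).length := by
        simp
      rw [this, show pref ++ x :: t = (pref ++ [x]) ++ t by simp, List.drop_left]
    rw [hsl]
    have := ih (pref ++ [x]) (f b x t)
    have hc : ((pref ++ [x]).length : Int) = (pref.length : Int) + 1 := by simp
    rw [hc] at this
    rw [show pref ++ x :: t = (pref ++ [x]) ++ t by simp]
    exact this

theorem enumFold0 {α β : Type} (f : β → α → List α → β) (xs : List α) (b : β) :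
    (PySem.List.enumerate xs 0).foldl
      (fun b ai => f b ai.2 (PySem.List.slice xs (some (ai.1 + 1)) none)) b
    = sufFold f xs b := by
  have := enumFold f xs [] b
  simpa using this

theorem sufFold_opairs {α γ : Type} (F : γ → α × α → γ) :
    ∀ (l : List α) (c : γ),
    sufFold (fun c i t => t.foldl (fun c n => F c (i, n)) c) l c = (opairs l).foldl F c := by
  intro l
  induction l with
  | nil => intro c; rfl
  | cons x t ih =>
    intro c
    rw [sufFold, ih, opairs, List.foldl_append, List.foldl_map]

theorem foldl_skip_append {α β : Type} (p : α → Bool) (g : α → β) :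
    ∀ (l : List α) (acc : List β),
    l.foldl (fun acc n => if p n then acc else acc ++ [g n]) acc
    = acc ++ (l.filter (fun n => !p n)).map g := by
  intro l
  induction l with
  | nil => intro acc; simp
  | cons x t ih =>
    intro acc
    rw [List.foldl_cons]
    cases hp : p x <;> simp [hp, ih]

theorem flatFold {β α γ : Type} (g : β → List α) (F : γ → α → γ) :
    ∀ (l : List β) (c : γ),
    l.foldl (fun c ks => (g ks).foldl F c) c = (l.flatMap g).foldl F c := by
  intro l
  induction l with
  | nil => intro c; rfl
  | cons x t ih => intro c; rw [List.foldl_cons, List.flatMap_cons, List.foldl_append, ih]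

theorem mem_opairs {α : Type} (p : α × α) : ∀ (l : List α), p ∈ opairs l → p.1 ∈ l ∧ p.2 ∈ l := by
  intro l
  induction l with
  | nil => intro h; simp [opairs] at h
  | cons x t ih =>
    intro h
    rw [opairs, List.mem_append] at h
    rcases h with h | h
    · obtain ⟨y, hy, he⟩ := List.mem_map.1 h
      subst he; simp [hy]
    · have := ih h; exact ⟨by simp [this.1], by simp [this.2]⟩

theorem mem_opairs_append {α : Type} (x y : α) : ∀ (u v : List α), x ∈ u → y ∈ v →
    (x, y) ∈ opairs (u ++ v) := by
  intro u
  induction u with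
  | nil => intro v h; simp at h
  | cons a u' ih =>
    intro v hx hy
    rw [List.cons_append, opairs, List.mem_append]
    rcases List.mem_cons.1 hx with h | h
    · subst h; left; exact List.mem_map.2 ⟨y, by simp [hy], rfl⟩
    · right; exact ih v h hy

theorem nodup_opairs {α : Type} : ∀ (l : List α), l.Nodup → (opairs l).Nodup := by
  intro l
  induction l with
  | nil => intro _; simp [opairs]
  | cons x t ih =>
    intro h
    rw [opairs]
    rcases List.nodup_cons.1 h with ⟨hx, ht⟩
    refine List.Nodup.append ?_ (ih ht) ?_
    · exact ht.map (fun a b hab => by simpa using congrArg Prod.snd hab)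
    · intro p hp hq
      obtain ⟨y, _, he⟩ := List.mem_map.1 hp
      have := (mem_opairs p _ hq).1
      rw [← he] at this
      exact hx this

theorem opairs_filter {α : Type} (q : α → Bool) : ∀ (l : List α),
    opairs (l.filter q) = (opairs l).filter (fun p => q p.1 && q p.2) := by
  intro l
  induction l with
  | nil => simp [opairs]
  | cons x t ih =>
    rw [List.filter_cons]
    cases hq : q x
    · simp only [Bool.false_eq_true, if_false]
      rw [ih, opairs, List.filter_append, List.filter_map]
      have hnil : List.filter ((fun p => q p.1 && q p.2) ∘ fun y => (x, y)) t = [] := by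
        apply List.filter_eq_nil_iff.2
        intro a _
        simp [Function.comp, hq]
      rw [hnil]
      simp
    · simp only [if_true]
      rw [opairs, opairs, List.filter_append, List.filter_map, ih]
      congr 1
      congr 1
      apply List.filter_congr
      intro a _
      simp [Function.comp, hq]

theorem dict_contains_items {α ν : Type} [BEq α] [LawfulBEq α]
    (d : PySem.Dict α ν) (E : List α) (f : α → ν)
    (hd : d.items = E.map (fun p => (p, f p))) (q : α) :
    d.contains q = E.contains q := by
  rw [PySem.Dict.contains, hd, List.any_map]
  clear hd
  induction E with
  | nil => rfl
  | cons e E' ih =>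
    rw [List.any_cons, ih]
    show ((e == q) || _) = _
    rw [BEq.comm]
    rfl

theorem find?_map_pair {α ν : Type} [BEq α] [LawfulBEq α] (f : α → ν) (q : α) :
    ∀ (E : List α), q ∈ E →
    (E.map (fun p => (p, f p))).find? (fun p => p.1 == q) = some (q, f q) := by
  intro E
  induction E with
  | nil => intro h; simp at h
  | cons e E' ih =>
    intro hq
    rw [List.map_cons, List.find?_cons]
    by_cases he : e = q
    · subst he; simp
    · have h1 : ((e, f e).1 == q) = false := by simpa using he
      rw [h1]
      exact ih (by rcases List.mem_cons.1 hq with h | h; exact absurd h.symm he; exact h)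

theorem dict_getD_items {α : Type} [BEq α] [LawfulBEq α]
    (d : PySem.Dict α Int) (E : List α) (f : α → Int)
    (hd : d.items = E.map (fun p => (p, f p))) (q : α) (hq : q ∈ E) :
    d.getD q 0 = f q := by
  rw [PySem.Dict.getD, PySem.Dict.get?, hd, find?_map_pair f q E hq]
  rfl

-- ===== A-side: the double loop fills f_dict with exactly the eligible ordered pairs =====
theorem A_inner_rest (fd : List (String × List String)) (i : String) :
    ∀ (rest : List String) (d : PySem.Dict (String × String) Int),
    rest.Nodup → (∀ n ∈ rest, i ≠ n) →
    (∀ n ∈ rest, ∀ v : Int, ((n, i), v) ∉ d.items ∧ ((i, n), v) ∉ d.items) →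
    (rest.foldl (AStep fd i) d).items
    = d.items ++ (rest.filter (fun n => pvElig fd (i, n))).map (fun n => ((i, n), pvCnt fd (i, n))) := by
  intro rest
  induction rest with
  | nil => intro d _ _ _; simp
  | cons n t ih =>
    intro d hnd hne hni
    rw [List.foldl_cons]
    have hne1 : i ≠ n := hne n (by simp)
    have hcontains : d.contains (n, i) = false := by
      rw [PySem.Dict.contains]
      apply List.any_eq_false.2
      intro p hp
      simp only [beq_iff_eq]
      intro hpe
      exact (hni n (by simp) p.2).1 (by rw [show ((n, i), p.2) = p from Prod.ext hpe.symm rfl]; exact hp)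
    rw [List.filter_cons]
    cases helig : pvElig fd (i, n)
    · have htest : ((pvGet fd i).contains n || (pvGet fd n).contains i) = true := by
        cases hx : ((pvGet fd i).contains n || (pvGet fd n).contains i)
        · rw [pvElig] at helig; simp only [hx] at helig; simp at helig
        · rfl
      have hstep : AStep fd i d n = d := by
        rw [AStep]
        simp only [hcontains, htest, if_true, if_false, Bool.false_eq_true]
        rw [if_neg (by simpa using hne1)]
      rw [hstep]
      simp only [Bool.false_eq_true, if_false]
      exact ih d (List.nodup_cons.1 hnd).2 (fun m hm => hne m (by simp [hm]))
        (fun m hm v => hni m (by simp [hm]) v)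
    · have htest : ((pvGet fd i).contains n || (pvGet fd n).contains i) = false := by
        cases hx : ((pvGet fd i).contains n || (pvGet fd n).contains i)
        · rfl
        · rw [pvElig] at helig; simp only [hx] at helig; simp at helig
      have hc2 : d.contains (i, n) = false := by
        rw [PySem.Dict.contains]
        apply List.any_eq_false.2
        intro p hp
        simp only [beq_iff_eq]
        intro hpe
        exact (hni n (by simp) p.2).2 (by rw [show ((i, n), p.2) = p from Prod.ext hpe.symm rfl]; exact hp)
      have hstep : AStep fd i d n
          = PySem.Dict.mk (d.items ++ [((i, n), pvCnt fd (i, n))]) := by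
        rw [AStep]
        simp only [hcontains, htest, if_false, Bool.false_eq_true]
        rw [if_neg (by simpa using hne1), PySem.Dict.insert, hc2]
        simp [pvCnt]
      rw [hstep]
      have hrec := ih (PySem.Dict.mk (d.items ++ [((i, n), pvCnt fd (i, n))]))
        (List.nodup_cons.1 hnd).2 (fun m hm => hne m (by simp [hm]))
        (fun m hm v => by
          constructor
          · intro hmem
            rcases List.mem_append.1 hmem with h | h
            · exact (hni m (by simp [hm]) v).1 h
            · have := List.mem_singleton.1 h
              have h1 : m = i := congrArg (fun q => q.1.1) this
              exact hne m (by simp [hm]) h1.symm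
          · intro hmem
            rcases List.mem_append.1 hmem with h | h
            · exact (hni m (by simp [hm]) v).2 h
            · have := List.mem_singleton.1 h
              have h2 : m = n := congrArg (fun q => q.1.2) this
              exact (List.nodup_cons.1 hnd).1 (h2 ▸ hm))
      rw [hrec]
      simp

theorem A_inner_pref (fd : List (String × List String)) (i : String)
    (pref : List String) (d : PySem.Dict (String × String) Int)
    (hI : ∀ n, d.contains (n, i) = (pref.contains n && pvElig fd (n, i)))
    (hip : i ∉ pref) :
    pref.foldl (AStep fd i) d = d := by
  apply foldl_id
  intro n hn
  rw [AStep]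
  have hne : i ≠ n := fun he => hip (he ▸ hn)
  rw [if_neg (by simpa using hne)]
  cases helig : pvElig fd (n, i)
  · have htest : ((pvGet fd i).contains n || (pvGet fd n).contains i) = true := by
      have h2 := pvElig_symm fd i n
      rw [helig] at h2
      cases hx : ((pvGet fd i).contains n || (pvGet fd n).contains i)
      · rw [pvElig] at h2; simp only [hx] at h2; simp at h2
      · rfl
    rw [hI n, helig, htest]
    simp
  · rw [hI n, helig]
    simp [hn]

theorem A_inner (fd : List (String × List String)) (pref : List String) (i : String)
    (rest : List String) (hnd : (pref ++ i :: rest).Nodup)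
    (d : PySem.Dict (String × String) Int)
    (hd : d.items = ((opairs (pref ++ i :: rest)).filter
        (fun p => pref.contains p.1 && pvElig fd p)).map (fun p => (p, pvCnt fd p))) :
    ((pref ++ i :: rest).foldl (AStep fd i) d).items
    = d.items ++ (rest.filter (fun n => pvElig fd (i, n))).map (fun n => ((i, n), pvCnt fd (i, n))) := by
  have hsplit := List.nodup_append.1 hnd
  obtain ⟨hpref, hcons, hdisj⟩ := hsplit
  have hirest := List.nodup_cons.1 hcons
  have hipref : i ∉ pref := fun h => hdisj i h i (by simp) rfl
  have hcont : ∀ q : String × String,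
      d.contains q = ((opairs (pref ++ i :: rest)).filter
        (fun p => pref.contains p.1 && pvElig fd p)).contains q :=
    fun q => dict_contains_items d _ _ hd q
  rw [List.foldl_append, List.foldl_cons]
  have h1 : pref.foldl (AStep fd i) d = d := by
    apply A_inner_pref fd i pref d ?_ hipref
    intro n
    rw [hcont (n, i)]
    by_cases hn : n ∈ pref
    · cases helig : pvElig fd (n, i)
      · simp only [List.elem_iff.2 hn, Bool.true_and]
        apply Bool.eq_false_iff.2
        intro hc
        have hmf := List.mem_filter.1 (List.elem_iff.1 hc)
        rw [Bool.and_eq_true, helig] at hmf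
        exact absurd hmf.2.2 (by simp)
      · simp only [List.elem_iff.2 hn, Bool.true_and]
        have hmem : (n, i) ∈ (opairs (pref ++ i :: rest)).filter
            (fun p => pref.contains p.1 && pvElig fd p) := by
          apply List.mem_filter.2
          refine ⟨mem_opairs_append n i pref (i :: rest) hn (by simp), ?_⟩
          rw [Bool.and_eq_true]
          exact ⟨List.elem_iff.2 hn, helig⟩
        exact List.elem_iff.2 hmem
    · have hnc : pref.contains n = false := by
        cases hx : pref.contains n
        · rfl
        · exact absurd (List.elem_iff.1 hx) hn
      rw [hnc, Bool.false_and]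
      apply Bool.eq_false_iff.2
      intro hc
      have hmf := List.mem_filter.1 (List.elem_iff.1 hc)
      rw [Bool.and_eq_true] at hmf
      exact hn (List.elem_iff.1 hmf.2.1)
  rw [h1]
  have h2 : AStep fd i d i = d := by
    rw [AStep]; simp
  rw [h2]
  apply A_inner_rest fd i rest d hirest.2
  · intro n hn he
    exact hirest.1 (he ▸ hn)
  · intro n hn v
    constructor
    · intro hmem
      rw [hd] at hmem
      obtain ⟨p, hp, he⟩ := List.mem_map.1 hmem
      have hp1 : p = (n, i) := congrArg (fun q => q.1) he
      rw [hp1] at hp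
      have hmf := List.mem_filter.1 hp
      rw [Bool.and_eq_true] at hmf
      exact hdisj n (List.elem_iff.1 hmf.2.1) n (by simp [hn]) rfl
    · intro hmem
      rw [hd] at hmem
      obtain ⟨p, hp, he⟩ := List.mem_map.1 hmem
      have hp1 : p = (i, n) := congrArg (fun q => q.1) he
      rw [hp1] at hp
      have hmf := List.mem_filter.1 hp
      rw [Bool.and_eq_true] at hmf
      exact hipref (List.elem_iff.1 hmf.2.1)

theorem filter_opairs_split (fd : List (String × List String)) :
    ∀ (u : List String) (i : String) (v : List String), (u ++ i :: v).Nodup →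
    ((opairs (u ++ i :: v)).filter (fun p => (u ++ [i]).contains p.1 && pvElig fd p)).map
        (fun p => (p, pvCnt fd p))
    = ((opairs (u ++ i :: v)).filter (fun p => u.contains p.1 && pvElig fd p)).map
        (fun p => (p, pvCnt fd p))
      ++ (v.filter (fun n => pvElig fd (i, n))).map (fun n => ((i, n), pvCnt fd (i, n))) := by
  intro u
  induction u with
  | nil =>
    intro i v hnd
    simp only [List.nil_append]
    simp only [show opairs (i :: v) = (v.map (fun y => (i, y))) ++ opairs v from rfl]
    rw [List.filter_append, List.filter_append, List.map_append, List.map_append]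
    have hiv : i ∉ v := (List.nodup_cons.1 hnd).1
    have hA : (opairs v).filter (fun p => ([i] : List String).contains p.1 && pvElig fd p) = [] := by
      apply List.filter_eq_nil_iff.2
      intro p hp
      have h1 := (mem_opairs p v hp).1
      intro hcon
      rw [Bool.and_eq_true] at hcon
      have := List.elem_iff.1 hcon.1
      rw [List.mem_singleton] at this
      exact hiv (this ▸ h1)
    have hB : (opairs v).filter (fun p => ([] : List String).contains p.1 && pvElig fd p) = [] := by
      apply List.filter_eq_nil_iff.2
      intro p _
      simp
    have hC : (v.map (fun y => (i, y))).filter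
        (fun p => ([] : List String).contains p.1 && pvElig fd p) = [] := by
      apply List.filter_eq_nil_iff.2
      intro p _
      simp
    have hD : (v.map (fun y => (i, y))).filter (fun p => ([i] : List String).contains p.1 && pvElig fd p)
        = (v.map (fun y => (i, y))).filter (fun p => pvElig fd p) := by
      apply List.filter_congr
      intro p hp
      obtain ⟨y, _, he⟩ := List.mem_map.1 hp
      have hpx : p.1 = i := by rw [← he]
      simp [hpx]
    rw [hA, hB, hC, hD]
    simp only [List.map_nil, List.nil_append, List.append_nil]
    rw [List.filter_map, List.map_map]
    simp [Function.comp_def]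
  | cons x u' ih =>
    intro i v hnd
    simp only [List.cons_append]
    simp only [show opairs (x :: (u' ++ i :: v)) = ((u' ++ i :: v).map (fun y => (x, y))) ++ opairs (u' ++ i :: v) from rfl]
    have hih := ih i v (List.nodup_cons.1 hnd).2
    have hxnotin : x ∉ u' ++ i :: v := (List.nodup_cons.1 hnd).1
    generalize hw : u' ++ i :: v = w at hih hxnotin ⊢
    rw [List.filter_append, List.filter_append, List.map_append, List.map_append]
    have h1 : (w.map (fun y => (x, y))).filter
        (fun p => (x :: (u' ++ [i])).contains p.1 && pvElig fd p)
        = (w.map (fun y => (x, y))).filter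
        (fun p => (x :: u').contains p.1 && pvElig fd p) := by
      apply List.filter_congr
      intro p hp
      obtain ⟨y, _, he⟩ := List.mem_map.1 hp
      have hpx : p.1 = x := by rw [← he]
      simp [hpx]
    have h2 : (opairs w).filter
        (fun p => (x :: (u' ++ [i])).contains p.1 && pvElig fd p)
        = (opairs w).filter
        (fun p => (u' ++ [i]).contains p.1 && pvElig fd p) := by
      apply List.filter_congr
      intro p hp
      have hpm := (mem_opairs p _ hp).1
      have hpx : p.1 ≠ x := fun he => hxnotin (he ▸ hpm)
      rw [List.contains_cons]
      have : (p.1 == x) = false := by simpa using hpx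
      rw [this, Bool.false_or]
    have h3 : (opairs w).filter
        (fun p => (x :: u').contains p.1 && pvElig fd p)
        = (opairs w).filter
        (fun p => u'.contains p.1 && pvElig fd p) := by
      apply List.filter_congr
      intro p hp
      have hpm := (mem_opairs p _ hp).1
      have hpx : p.1 ≠ x := fun he => hxnotin (he ▸ hpm)
      rw [List.contains_cons]
      have : (p.1 == x) = false := by simpa using hpx
      rw [this, Bool.false_or]
    rw [h1, h2, h3, hih, List.append_assoc]

theorem A_outer (fd : List (String × List String)) :
    ∀ (todo pref : List String) (d : PySem.Dict (String × String) Int),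
    fd.map (·.1) = pref ++ todo → (fd.map (·.1)).Nodup →
    d.items = ((opairs (fd.map (·.1))).filter
        (fun p => pref.contains p.1 && pvElig fd p)).map (fun p => (p, pvCnt fd p)) →
    (todo.foldl (fun d i => (fd.map (·.1)).foldl (AStep fd i) d) d).items
    = ((opairs (fd.map (·.1))).filter
        (fun p => (pref ++ todo).contains p.1 && pvElig fd p)).map (fun p => (p, pvCnt fd p)) := by
  intro todo
  induction todo with
  | nil =>
    intro pref d hk _ hd
    simpa using hd
  | cons i t ih =>
    intro pref d hk hnd hd
    rw [List.foldl_cons]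
    have hnd' : (pref ++ i :: t).Nodup := hk ▸ hnd
    have hinner := A_inner fd pref i t hnd' d (by have hd' := hd; rw [hk] at hd'; exact hd')
    rw [← hk] at hinner
    have hstep := ih (pref ++ [i]) _ (by rw [hk]; simp) hnd
      (by
        rw [hinner, hd]
        have := filter_opairs_split fd pref i t hnd'
        rw [← hk] at this
        exact this.symm)
    rw [hstep]
    have : pref ++ [i] ++ t = pref ++ i :: t := by simp
    rw [this]

theorem A_items (fd : List (String × List String)) (hnd : (fd.map (·.1)).Nodup) :
    ((fd.map (·.1)).foldl (fun d i => (fd.map (·.1)).foldl (AStep fd i) d)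
        PySem.Dict.empty).items
    = (pvE fd).map (fun p => (p, pvCnt fd p)) := by
  have h0 : (PySem.Dict.empty : PySem.Dict (String × String) Int).items
      = ((opairs (fd.map (·.1))).filter
        (fun p => ([] : List String).contains p.1 && pvElig fd p)).map (fun p => (p, pvCnt fd p)) := by
    have : (opairs (fd.map (·.1))).filter
        (fun p => ([] : List String).contains p.1 && pvElig fd p) = [] := by
      apply List.filter_eq_nil_iff.2
      intro p _
      simp
    rw [this]
    rfl
  have := A_outer fd (fd.map (·.1)) [] PySem.Dict.empty (by simp) hnd h0
  rw [this]
  rw [pvE]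
  congr 1
  apply List.filter_congr
  intro p hp
  have := (mem_opairs p _ hp).1
  rw [List.nil_append]
  simp [this]

-- ===== B-side =====
-- the (person, key-holder) incidence list B's members dict is built from
def pvL (fd : List (String × List String)) : List (String × String) :=
  (fd.map (·.1)).flatMap (fun k => (PySem.List.dedup (pvGet fd k)).map (fun c => (c, k)))

theorem dedup_nodup (xs : List String) : (PySem.List.dedup xs).Nodup :=
  PySem.Set.nodup_ofList xs

theorem pvL_filter (fd : List (String × List String)) (c : String) :
    ∀ ks : List String,
    ((ks.flatMap (fun k => (PySem.List.dedup (pvGet fd k)).map (fun c => (c, k)))).filter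
        (fun q => q.1 == c)).map (·.2)
    = ks.filter (fun k => (PySem.List.dedup (pvGet fd k)).contains c) := by
  intro ks
  induction ks with
  | nil => rfl
  | cons k t ih =>
    rw [List.flatMap_cons, List.filter_append, List.map_append, ih, List.filter_cons]
    have hnd : (PySem.List.dedup (pvGet fd k)).Nodup := dedup_nodup _
    cases hc : (PySem.List.dedup (pvGet fd k)).contains c
    · have h0 : ((PySem.List.dedup (pvGet fd k)).map (fun c' => (c', k))).filter
          (fun q => q.1 == c) = [] := by
        apply List.filter_eq_nil_iff.2
        intro q hq
        obtain ⟨c', hc', he⟩ := List.mem_map.1 hq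
        intro hqe
        have h1 : q.1 = c' := by rw [← he]
        rw [beq_iff_eq] at hqe
        rw [hqe] at h1
        have hcc : (PySem.List.dedup (pvGet fd k)).contains c = true :=
          List.elem_iff.2 (h1 ▸ hc')
        rw [hc] at hcc
        exact absurd hcc (by simp)
      rw [h0]
      simp
    · have hcm : c ∈ PySem.List.dedup (pvGet fd k) := List.elem_iff.1 hc
      have h1 : (PySem.List.dedup (pvGet fd k)).filter (fun c' => c' == c) = [c] := by
        rw [List.filter_beq, List.count_eq_one_of_mem hnd hcm]
        rfl
      have h2 : ((PySem.List.dedup (pvGet fd k)).map (fun c' => (c', k))).filter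
          (fun q => q.1 == c) = [(c, k)] := by
        rw [List.filter_map]
        have h3 : ((fun (q : String × String) => q.1 == c) ∘ fun c' => (c', k))
            = (fun c' => c' == c) := rfl
        rw [h3, h1]
        rfl
      rw [h2]
      simp

theorem B_members (fd : List (String × List String)) :
    (fd.map (·.1)).foldl (fun m k =>
        (PySem.List.dedup (pvGet fd k)).foldl
          (fun m c => m.modify c [] (fun l => l ++ [k])) m) PySem.Dict.empty
    = (pvL fd).foldl (fun m p => m.modify p.1 [] (fun l => l ++ [p.2])) PySem.Dict.empty := by
  have hstep : (fun (m : PySem.Dict String (List String)) k =>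
      (PySem.List.dedup (pvGet fd k)).foldl
        (fun m c => m.modify c [] (fun l => l ++ [k])) m)
      = (fun m k => (((PySem.List.dedup (pvGet fd k)).map (fun c => (c, k))).foldl
        (fun m p => m.modify p.1 [] (fun l => l ++ [p.2])) m)) := by
    funext m k
    rw [List.foldl_map]
  rw [hstep]
  exact flatFold _ _ _ _

theorem counts_count (fd : List (String × List String)) (hnd : (fd.map (·.1)).Nodup)
    (p : String × String) (hp : p ∈ opairs (fd.map (·.1))) :
    ∀ C : List String,
    ((C.flatMap (fun c => opairs ((fd.map (·.1)).filter
        (fun k => (PySem.List.dedup (pvGet fd k)).contains c)))).count p : Nat)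
    = C.countP (fun c => (PySem.List.dedup (pvGet fd p.1)).contains c &&
        (PySem.List.dedup (pvGet fd p.2)).contains c) := by
  intro C
  induction C with
  | nil => rfl
  | cons c C' ih =>
    rw [List.flatMap_cons, List.count_append, ih, List.countP_cons]
    have h1 : (opairs ((fd.map (·.1)).filter
        (fun k => (PySem.List.dedup (pvGet fd k)).contains c))).count p
        = if ((PySem.List.dedup (pvGet fd p.1)).contains c &&
            (PySem.List.dedup (pvGet fd p.2)).contains c) = true then 1 else 0 := by
      rw [opairs_filter]
      cases hq2 : ((PySem.List.dedup (pvGet fd p.1)).contains c &&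
          (PySem.List.dedup (pvGet fd p.2)).contains c)
      · rw [if_neg (by simp)]
        apply List.count_eq_zero_of_not_mem
        intro hmem
        have := (List.mem_filter.1 hmem).2
        rw [hq2] at this
        exact absurd this (by simp)
      · rw [if_pos (by simp)]
        apply List.count_eq_one_of_mem ((nodup_opairs _ hnd).filter _)
        exact List.mem_filter.2 ⟨hp, hq2⟩
    rw [h1]
    cases hq : ((PySem.List.dedup (pvGet fd p.1)).contains c &&
        (PySem.List.dedup (pvGet fd p.2)).contains c)
    · simp
    · simp
      omega

theorem countP_cnt (fd : List (String × List String))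
    (p : String × String) (hp : p ∈ opairs (fd.map (·.1))) :
    ((PySem.Set.ofList ((pvL fd).map (·.1))).countP
        (fun c => (PySem.List.dedup (pvGet fd p.1)).contains c &&
          (PySem.List.dedup (pvGet fd p.2)).contains c) : Int)
    = pvCnt fd p := by
  have hCnd : (PySem.Set.ofList ((pvL fd).map (·.1))).Nodup := PySem.Set.nodup_ofList _
  have hd1 : (PySem.List.dedup (pvGet fd p.1)).Nodup := dedup_nodup _
  have hp1 : p.1 ∈ fd.map (·.1) := (mem_opairs p _ hp).1
  -- every distinct friend of p.1 appears among the tallied persons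
  have hsub : ∀ c ∈ PySem.List.dedup (pvGet fd p.1),
      c ∈ PySem.Set.ofList ((pvL fd).map (·.1)) := by
    intro c hc
    apply (PySem.Set.mem_ofList _ _).2
    apply List.mem_map.2
    refine ⟨(c, p.1), ?_, rfl⟩
    rw [pvL]
    apply List.mem_flatMap.2
    exact ⟨p.1, hp1, List.mem_map.2 ⟨c, hc, rfl⟩⟩
  have hperm : ((PySem.Set.ofList ((pvL fd).map (·.1))).filter
      (fun c => (PySem.List.dedup (pvGet fd p.1)).contains c &&
        (PySem.List.dedup (pvGet fd p.2)).contains c)).Perm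
      ((PySem.List.dedup (pvGet fd p.1)).filter
        (fun c => (PySem.List.dedup (pvGet fd p.2)).contains c)) := by
    apply (List.perm_ext_iff_of_nodup (hCnd.filter _) (hd1.filter _)).2
    intro a
    rw [List.mem_filter, List.mem_filter, Bool.and_eq_true]
    constructor
    · rintro ⟨_, h2, h3⟩
      exact ⟨List.elem_iff.1 h2, h3⟩
    · rintro ⟨h1, h2⟩
      exact ⟨hsub a h1, List.elem_iff.2 h1, h2⟩
  rw [List.countP_eq_length_filter, hperm.length_eq]
  rw [pvCnt, PySem.Set.len]
  congr 1

theorem B_counts (fd : List (String × List String)) (hnd : (fd.map (·.1)).Nodup)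
    (p : String × String) (hp : p ∈ opairs (fd.map (·.1))) :
    (((fd.map (·.1)).foldl (fun m k =>
          (PySem.List.dedup (pvGet fd k)).foldl
            (fun m c => m.modify c [] (fun l => l ++ [k])) m) PySem.Dict.empty).values.foldl
      (fun cd ks =>
        (PySem.List.enumerate ks).foldl (fun cd xi =>
          (PySem.List.slice ks (some (xi.1 + 1)) none).foldl (fun cd n =>
            cd.insert (xi.2, n) (cd.getD (xi.2, n) 0 + 1)) cd) cd) PySem.Dict.empty).getD p 0
    = pvCnt fd p := by
  have hBM := B_members fd
  -- the members dict: keys, nodup, lookups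
  have hkeys : ((pvL fd).foldl (fun m p => m.modify p.1 [] (fun l => l ++ [p.2]))
      (PySem.Dict.empty : PySem.Dict String (List String))).keys
      = PySem.Set.ofList ((pvL fd).map (·.1)) := by
    have h := PySem.Dict.keys_foldl_modify_key (pvL fd) (fun p => p.1) ([] : List String)
      (fun _ p => fun l => l ++ [p.2]) PySem.Dict.empty
    exact h.trans (PySem.Set.ofList_eq_foldl _).symm
  have hknd : ((pvL fd).foldl (fun m p => m.modify p.1 [] (fun l => l ++ [p.2]))
      (PySem.Dict.empty : PySem.Dict String (List String))).keys.Nodup := by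
    exact PySem.Dict.nodup_keys_foldl_modify_key (pvL fd) (fun p => p.1) ([] : List String)
      (fun _ p => fun l => l ++ [p.2]) PySem.Dict.empty List.nodup_nil
  have hget : ∀ c, ((pvL fd).foldl (fun m p => m.modify p.1 [] (fun l => l ++ [p.2]))
      (PySem.Dict.empty : PySem.Dict String (List String))).getD c []
      = (fd.map (·.1)).filter (fun k => (PySem.List.dedup (pvGet fd k)).contains c) := by
    intro c
    have h1 := PySem.Dict.getD_foldl_modify_append (pvL fd) PySem.Dict.empty c
    refine h1.trans ?_
    rw [show (PySem.Dict.empty : PySem.Dict String (List String)).getD c [] = [] from rfl,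
      List.nil_append]
    exact pvL_filter fd c (fd.map (·.1))
  have hvals : ((pvL fd).foldl (fun m p => m.modify p.1 [] (fun l => l ++ [p.2]))
      (PySem.Dict.empty : PySem.Dict String (List String))).values
      = (PySem.Set.ofList ((pvL fd).map (·.1))).map
        (fun c => (fd.map (·.1)).filter (fun k => (PySem.List.dedup (pvGet fd k)).contains c)) := by
    have h := PySem.Dict.values_eq_map_keys _ hknd ([] : List String)
    rw [h, hkeys]
    exact List.map_congr_left (fun c _ => hget c)
  -- the counts dict is a counter over the flattened ordered pairs
  have hin : (fun (cd : PySem.Dict (String × String) Int) (ks : List String) =>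
      (PySem.List.enumerate ks).foldl (fun cd xi =>
        (PySem.List.slice ks (some (xi.1 + 1)) none).foldl (fun cd n =>
          cd.insert (xi.2, n) (cd.getD (xi.2, n) 0 + 1)) cd) cd)
      = (fun cd ks => (opairs ks).foldl
          (fun cd q => cd.insert q (cd.getD q 0 + 1)) cd) := by
    funext cd ks
    exact (enumFold0 (fun cd i t => t.foldl
        (fun cd n => cd.insert (i, n) (cd.getD (i, n) 0 + 1)) cd) ks cd).trans
      (sufFold_opairs (fun cd q => cd.insert q (cd.getD q 0 + 1)) ks cd)
  rw [hBM, hin, flatFold, PySem.Dict.getD_foldl_insert_add_one]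
  rw [hvals]
  rw [show ((PySem.Set.ofList ((pvL fd).map (·.1))).map
      (fun c => (fd.map (·.1)).filter
        (fun k => (PySem.List.dedup (pvGet fd k)).contains c))).flatMap opairs
      = (PySem.Set.ofList ((pvL fd).map (·.1))).flatMap
        (fun c => opairs ((fd.map (·.1)).filter
          (fun k => (PySem.List.dedup (pvGet fd k)).contains c))) from by
    rw [List.flatMap_map]]
  rw [counts_count fd hnd p hp]
  rw [show (PySem.Dict.empty : PySem.Dict (String × String) Int).getD p 0 = 0 from rfl]
  rw [zero_add]
  exact countP_cnt fd p hp

theorem B_pairs (fd : List (String × List String)) :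
    (PySem.List.enumerate (fd.map (·.1))).foldl (fun acc ai =>
      (PySem.List.slice (fd.map (·.1)) (some (ai.1 + 1)) none).foldl (fun acc n =>
        if (pvGet fd ai.2).contains n || (pvGet fd n).contains ai.2 then acc
        else acc ++ [(ai.2, n)]) acc) []
    = pvE fd := by
  have h1 := enumFold0 (fun acc (i : String) (t : List String) =>
      t.foldl (fun acc n => if (pvGet fd i).contains n || (pvGet fd n).contains i then acc
        else acc ++ [(i, n)]) acc) (fd.map (·.1)) []
  have h2 := sufFold_opairs (fun acc (q : String × String) =>
      if (pvGet fd q.1).contains q.2 || (pvGet fd q.2).contains q.1 then acc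
      else acc ++ [q]) (fd.map (·.1)) []
  have h3 := foldl_skip_append (fun q : String × String =>
      (pvGet fd q.1).contains q.2 || (pvGet fd q.2).contains q.1) (fun q => q)
      (opairs (fd.map (·.1))) []
  have h := (h1.trans h2).trans h3
  rw [List.nil_append] at h
  refine h.trans ?_
  rw [List.map_id']
  rfl

-- ===== assembly =====
theorem portA_eq (fd : List (String × List String)) (hnd : (fd.map (fun x : String × List String => x.1)).Nodup) :
    find_max_common_friends fd
    = match PySem.List.max? ((pvE fd).map (pvCnt fd)) (fun v => v) with
      | none => ([], 0)
      | some m => (PySem.List.sorted2 ((pvE fd).filter (fun p => pvCnt fd p == m)) (·.1) (·.2), m) := by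
  have hitems := A_items fd hnd
  show (match PySem.List.max? (((fd.map (fun x : String × List String => x.1)).foldl
        (fun d i => (fd.map (fun x : String × List String => x.1)).foldl (AStep fd i) d) PySem.Dict.empty).values) (fun v => v) with
    | none => ([], 0)
    | some max_var =>
      (PySem.List.sorted2 (((fd.map (fun x : String × List String => x.1)).foldl
          (fun d i => (fd.map (fun x : String × List String => x.1)).foldl (AStep fd i) d) PySem.Dict.empty).keys.foldl
        (fun acc v => if ((fd.map (fun x : String × List String => x.1)).foldl
            (fun d i => (fd.map (fun x : String × List String => x.1)).foldl (AStep fd i) d) PySem.Dict.empty).getD v 0 == max_var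
          then acc ++ [v] else acc) []) (fun p : String × String => p.1) (fun p : String × String => p.2), max_var))
    = _
  set D := (fd.map (fun x : String × List String => x.1)).foldl (fun d i => (fd.map (fun x : String × List String => x.1)).foldl (AStep fd i) d)
    PySem.Dict.empty with hDdef
  have hvals : D.values = (pvE fd).map (pvCnt fd) := by
    rw [PySem.Dict.values, hitems, List.map_map]
    rfl
  have hkeys : D.keys = pvE fd := by
    rw [PySem.Dict.keys, hitems, List.map_map]
    exact List.map_id' _
  rw [hvals]
  cases hm : PySem.List.max? ((pvE fd).map (pvCnt fd)) (fun v => v) with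
  | none => rfl
  | some m =>
    show (PySem.List.sorted2 (D.keys.foldl
        (fun acc v => if D.getD v 0 == m then acc ++ [v] else acc) [])
        (fun p : String × String => p.1) (fun p : String × String => p.2), m)
      = (PySem.List.sorted2 ((pvE fd).filter (fun p => pvCnt fd p == m))
        (fun p : String × String => p.1) (fun p : String × String => p.2), m)
    have hfold : (pvE fd).foldl
        (fun acc v => if D.getD v 0 == m then acc ++ [v] else acc) []
        = (pvE fd).filter (fun p => pvCnt fd p == m) := by
      rw [PySem.List.foldl_append_if_eq_filter, List.nil_append]
      apply List.filter_congr
      intro v hv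
      rw [dict_getD_items D (pvE fd) (pvCnt fd) hitems v hv]
    rw [hkeys, hfold]

theorem assembleB (P : List (String × String)) (C : PySem.Dict (String × String) Int)
    (E : List (String × String)) (f : (String × String) → Int)
    (hP : P = E) (hC : ∀ p ∈ E, C.getD p 0 = f p) :
    (match PySem.List.max? (P.map (fun p => C.getD p 0)) (fun v => v) with
     | none => (([] : List (String × String)), (0 : Int))
     | some m => (PySem.List.sorted2 (P.filter (fun p => C.getD p 0 == m))
        (fun x : String × String => x.1) (fun x : String × String => x.2), m))
    = match PySem.List.max? (E.map f) (fun v => v) with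
      | none => (([] : List (String × String)), (0 : Int))
      | some m => (PySem.List.sorted2 (E.filter (fun p => f p == m))
        (fun x : String × String => x.1) (fun x : String × String => x.2), m) := by
  subst hP
  rw [List.map_congr_left hC]
  cases hm : PySem.List.max? (P.map f) (fun v => v) with
  | none => rfl
  | some m =>
    show (PySem.List.sorted2 (P.filter (fun p => C.getD p 0 == m))
        (fun x : String × String => x.1) (fun x : String × String => x.2), m) = _
    rw [List.filter_congr (fun p hp => by rw [hC p hp])]

theorem portB_eq (fd : List (String × List String)) (hnd : (fd.map (·.1)).Nodup) :
    find_max_common_friends_alt fd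
    = match PySem.List.max? ((pvE fd).map (pvCnt fd)) (fun v => v) with
      | none => ([], 0)
      | some m => (PySem.List.sorted2 ((pvE fd).filter (fun p => pvCnt fd p == m)) (·.1) (·.2), m) := by
  exact assembleB _ _ (pvE fd) (pvCnt fd) (B_pairs fd)
    (fun p hp => B_counts fd hnd p
      ((List.mem_filter.1 (show p ∈ (opairs (fd.map (fun x : String × List String => x.1))).filter (pvElig fd) from hp)).1))

-- ===== VERDICT (by name: the statement is the Claim_ definition above) =====
theorem find_max_common_friends_spec : Claim_equal_find_max_common_friends := by
  intro fd _ hpre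
  unfold Spec_find_max_common_friends
  rw [portA_eq fd hpre.1, portB_eq fd hpre.1]
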